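-- pv_equiv track=rewrite | github.com/finwarman/advent-of-code-2024 | 21/solution.py | shortest_keypad_path
-- ===== SOURCE A (Python) =====
-- def shortest_keypad_path(start, end, gap, valid_positions):
--     if start == end:
--         return ''
--
--     x, y = start
--     gx, gy = end
--
--     dx = 1 if gx - x > 0 else (-1 if gx - x < 0 else 0)
--     dy = 1 if gy - y > 0 else (-1 if gy - y < 0 else 0)
--
--     seq = ''
--
--     horizontal_first = True
--     if (y == gap[1] and dy < 0) or (x == gap[0] and dx < 0):
--         horizontal_first = False
--
--     if horizontal_first:
--         while (x, y) != (gx, gy):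
--             if x != gx:
--                 x += dx
--                 seq += ('>' if dx > 0 else '<')
--             elif y != gy:
--                 y += dy
--                 seq += ('v' if dy > 0 else '^')
--     else:
--         while (x, y) != (gx, gy):
--             if y != gy:
--                 y += dy
--                 seq += ('v' if dy > 0 else '^')
--             elif x != gx:
--                 x += dx
--                 seq += ('>' if dx > 0 else '<')
--     return seq
-- ===== SOURCE B (Python) =====
-- def shortest_keypad_path(start, end, gap, valid_positions):
--     if start == end:
--         return ''
--     x, y = start
--     gx, gy = end
--     dx = (gx > x) - (gx < x)
--     dy = (gy > y) - (gy < y)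
--     horizontal = ('>' if dx > 0 else '<') * abs(gx - x)
--     vertical = ('v' if dy > 0 else '^') * abs(gy - y)
--     if (y == gap[1] and dy < 0) or (x == gap[0] and dx < 0):
--         return vertical + horizontal
--     return horizontal + vertical
-- ===== Notes on version B (the rewrite author's own statement) =====
-- stated objective: faster
-- what changed: Replaces A's one-cell-at-a-time while loop (one Python iteration and one string concatenation per step) with a closed-form construction: the horizontal and vertical segments are built directly by string repetition and concatenated in the order chosen by the gap test.
import Mathlib
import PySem

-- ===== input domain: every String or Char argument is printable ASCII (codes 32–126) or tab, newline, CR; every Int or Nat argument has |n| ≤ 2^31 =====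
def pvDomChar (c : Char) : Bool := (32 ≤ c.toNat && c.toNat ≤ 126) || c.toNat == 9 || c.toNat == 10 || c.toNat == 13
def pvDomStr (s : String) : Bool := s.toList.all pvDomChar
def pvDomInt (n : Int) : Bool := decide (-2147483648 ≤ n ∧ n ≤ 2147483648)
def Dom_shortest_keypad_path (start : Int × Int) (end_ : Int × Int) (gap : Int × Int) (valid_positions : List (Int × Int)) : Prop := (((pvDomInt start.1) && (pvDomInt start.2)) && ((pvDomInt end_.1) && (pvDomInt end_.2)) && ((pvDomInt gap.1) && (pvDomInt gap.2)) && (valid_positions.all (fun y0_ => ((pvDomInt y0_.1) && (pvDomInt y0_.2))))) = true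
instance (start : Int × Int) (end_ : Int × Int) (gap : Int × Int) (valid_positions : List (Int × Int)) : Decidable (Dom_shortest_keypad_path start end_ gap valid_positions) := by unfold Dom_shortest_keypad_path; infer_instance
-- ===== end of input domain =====

-- B replaces A's one-cell-at-a-time while loop with a closed-form build of the two
-- repeated-character segments, concatenated in the order A's gap test chooses (objective: simpler).

-- ===== PORT A =====
-- A's while loop, horizontal-first variant; seq is kept as List Char (appended on the right,
-- exactly as Python's seq += c) and wrapped into a String at the end.  fuel bounds the step
-- count (the loop always finishes after |gx-x| + |gy-y| steps); the fuel guard only makes the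
-- same computation total.
def pvLoopH (fuel : Nat) (x y gx gy dx dy : Int) (seq : List Char) : List Char :=
  match fuel with
  | 0 => seq
  | Nat.succ f =>
    if (x, y) ≠ (gx, gy) then
      if x ≠ gx then
        pvLoopH f (x + dx) y gx gy dx dy (seq ++ [if dx > 0 then '>' else '<'])
      else if y ≠ gy then
        pvLoopH f x (y + dy) gx gy dx dy (seq ++ [if dy > 0 then 'v' else '^'])
      else seq
    else seq

-- A's while loop, vertical-first variant.
def pvLoopV (fuel : Nat) (x y gx gy dx dy : Int) (seq : List Char) : List Char :=
  match fuel with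
  | 0 => seq
  | Nat.succ f =>
    if (x, y) ≠ (gx, gy) then
      if y ≠ gy then
        pvLoopV f x (y + dy) gx gy dx dy (seq ++ [if dy > 0 then 'v' else '^'])
      else if x ≠ gx then
        pvLoopV f (x + dx) y gx gy dx dy (seq ++ [if dx > 0 then '>' else '<'])
      else seq
    else seq

def shortest_keypad_path (start : Int × Int) (end_ : Int × Int) (gap : Int × Int) (valid_positions : List (Int × Int)) : String :=
  if start = end_ then "" else
  let x := start.1
  let y := start.2
  let gx := end_.1
  let gy := end_.2
  let dx : Int := if gx - x > 0 then 1 else if gx - x < 0 then -1 else 0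
  let dy : Int := if gy - y > 0 then 1 else if gy - y < 0 then -1 else 0
  let fuel := (gx - x).natAbs + (gy - y).natAbs
  if (y = gap.2 ∧ dy < 0) ∨ (x = gap.1 ∧ dx < 0) then
    String.ofList (pvLoopV fuel x y gx gy dx dy [])
  else
    String.ofList (pvLoopH fuel x y gx gy dx dy [])

-- ===== PORT B =====
def shortest_keypad_path_alt (start : Int × Int) (end_ : Int × Int) (gap : Int × Int) (valid_positions : List (Int × Int)) : String :=
  if start = end_ then "" else
  let x := start.1
  let y := start.2
  let gx := end_.1
  let gy := end_.2
  let dx : Int := (if gx > x then (1 : Int) else 0) - (if gx < x then 1 else 0)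
  let dy : Int := (if gy > y then (1 : Int) else 0) - (if gy < y then 1 else 0)
  let horizontal := List.replicate (gx - x).natAbs (if dx > 0 then '>' else '<')
  let vertical := List.replicate (gy - y).natAbs (if dy > 0 then 'v' else '^')
  if (y = gap.2 ∧ dy < 0) ∨ (x = gap.1 ∧ dx < 0) then
    String.ofList (vertical ++ horizontal)
  else
    String.ofList (horizontal ++ vertical)

-- ===== PRECONDITION & SPEC =====
def Spec_shortest_keypad_path (start : Int × Int) (end_ : Int × Int) (gap : Int × Int) (valid_positions : List (Int × Int)) (out : String) : Prop := out = shortest_keypad_path_alt start end_ gap valid_positions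
instance (start : Int × Int) (end_ : Int × Int) (gap : Int × Int) (valid_positions : List (Int × Int)) (out : String) : Decidable (Spec_shortest_keypad_path start end_ gap valid_positions out) := by unfold Spec_shortest_keypad_path; infer_instance

-- ===== CLAIM (what is proved, stated in full; the proofs are below) =====
def Claim_equal_shortest_keypad_path : Prop := ∀ (start : Int × Int) (end_ : Int × Int) (gap : Int × Int) (valid_positions : List (Int × Int)), Dom_shortest_keypad_path start end_ gap valid_positions → Spec_shortest_keypad_path start end_ gap valid_positions (shortest_keypad_path start end_ gap valid_positions)

-- ===== LEMMAS AND PROOFS =====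

-- vertical-only tail of the horizontal-first loop
lemma pvLoopH_vert (b : Nat) : ∀ (x y dx dy : Int) (seq : List Char),
    (b ≠ 0 → dy = 1 ∨ dy = -1) →
    pvLoopH b x y x (y + dy * b) dx dy seq
      = seq ++ List.replicate b (if dy > 0 then 'v' else '^') := by
  induction b with
  | zero => intro x y dx dy seq _; simp [pvLoopH]
  | succ n ih =>
    intro x y dx dy seq hdy
    have hdy' := hdy (Nat.succ_ne_zero n)
    have hyne : y ≠ y + dy * ((n : Int) + 1) := by
      rcases hdy' with h | h <;> rw [h] <;> omega
    simp only [pvLoopH]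
    rw [if_pos (by push_cast; exact fun h => hyne (congrArg Prod.snd h)),
        if_neg (by simp), if_pos (by push_cast; exact hyne)]
    have := ih x (y + dy) dx dy (seq ++ [if dy > 0 then 'v' else '^']) (fun _ => hdy')
    rw [show (y + dy) + dy * (n : Int) = y + dy * ((n : Nat) + 1 : Nat) from by push_cast; ring] at this
    rw [this, List.replicate_succ]
    simp

-- full horizontal-first loop: first the horizontal run, then the vertical run
lemma pvLoopH_spec (a : Nat) : ∀ (b : Nat) (x y dx dy : Int) (seq : List Char),
    (a ≠ 0 → dx = 1 ∨ dx = -1) → (b ≠ 0 → dy = 1 ∨ dy = -1) →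
    pvLoopH (a + b) x y (x + dx * a) (y + dy * b) dx dy seq
      = seq ++ List.replicate a (if dx > 0 then '>' else '<')
            ++ List.replicate b (if dy > 0 then 'v' else '^') := by
  induction a with
  | zero =>
    intro b x y dx dy seq _ hdy
    have := pvLoopH_vert b x y dx dy seq hdy
    simpa using this
  | succ n ih =>
    intro b x y dx dy seq hdx hdy
    have hdx' := hdx (Nat.succ_ne_zero n)
    have hxne : x ≠ x + dx * ((n : Int) + 1) := by
      rcases hdx' with h | h <;> rw [h] <;> omega
    rw [show n + 1 + b = (n + b) + 1 from by omega]
    simp only [pvLoopH]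
    rw [if_pos (by push_cast; exact fun h => hxne (congrArg Prod.fst h)),
        if_pos (by push_cast; exact hxne)]
    have := ih b (x + dx) y dx dy (seq ++ [if dx > 0 then '>' else '<']) (fun _ => hdx') hdy
    rw [show (x + dx) + dx * (n : Int) = x + dx * ((n : Nat) + 1 : Nat) from by push_cast; ring] at this
    rw [this, List.replicate_succ]
    simp

-- horizontal-only tail of the vertical-first loop
lemma pvLoopV_horiz (a : Nat) : ∀ (x y dx dy : Int) (seq : List Char),
    (a ≠ 0 → dx = 1 ∨ dx = -1) →
    pvLoopV a x y (x + dx * a) y dx dy seq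
      = seq ++ List.replicate a (if dx > 0 then '>' else '<') := by
  induction a with
  | zero => intro x y dx dy seq _; simp [pvLoopV]
  | succ n ih =>
    intro x y dx dy seq hdx
    have hdx' := hdx (Nat.succ_ne_zero n)
    have hxne : x ≠ x + dx * ((n : Int) + 1) := by
      rcases hdx' with h | h <;> rw [h] <;> omega
    simp only [pvLoopV]
    rw [if_pos (by push_cast; exact fun h => hxne (congrArg Prod.fst h)),
        if_neg (by simp), if_pos (by push_cast; exact hxne)]
    have := ih (x + dx) y dx dy (seq ++ [if dx > 0 then '>' else '<']) (fun _ => hdx')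
    rw [show (x + dx) + dx * (n : Int) = x + dx * ((n : Nat) + 1 : Nat) from by push_cast; ring] at this
    rw [this, List.replicate_succ]
    simp

-- full vertical-first loop: first the vertical run, then the horizontal run
lemma pvLoopV_spec (b : Nat) : ∀ (a : Nat) (x y dx dy : Int) (seq : List Char),
    (a ≠ 0 → dx = 1 ∨ dx = -1) → (b ≠ 0 → dy = 1 ∨ dy = -1) →
    pvLoopV (a + b) x y (x + dx * a) (y + dy * b) dx dy seq
      = seq ++ List.replicate b (if dy > 0 then 'v' else '^')
            ++ List.replicate a (if dx > 0 then '>' else '<') := by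
  induction b with
  | zero =>
    intro a x y dx dy seq hdx _
    have := pvLoopV_horiz a x y dx dy seq hdx
    simpa using this
  | succ n ih =>
    intro a x y dx dy seq hdx hdy
    have hdy' := hdy (Nat.succ_ne_zero n)
    have hyne : y ≠ y + dy * ((n : Int) + 1) := by
      rcases hdy' with h | h <;> rw [h] <;> omega
    rw [show a + (n + 1) = (a + n) + 1 from by omega]
    simp only [pvLoopV]
    rw [if_pos (by push_cast; exact fun h => hyne (congrArg Prod.snd h)),
        if_pos (by push_cast; exact hyne)]
    have := ih a x (y + dy) dx dy (seq ++ [if dy > 0 then 'v' else '^']) hdx (fun _ => hdy')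
    rw [show (y + dy) + dy * (n : Int) = y + dy * ((n : Nat) + 1 : Nat) from by push_cast; ring] at this
    rw [this, List.replicate_succ]
    simp

-- ===== VERDICT (by name: the statement is the Claim_ definition above) =====
theorem shortest_keypad_path_spec : Claim_equal_shortest_keypad_path := by
  intro start end_ gap vp _
  unfold Spec_shortest_keypad_path shortest_keypad_path shortest_keypad_path_alt
  by_cases hse : start = end_
  · simp [hse]
  · rw [if_neg hse, if_neg hse]
    obtain ⟨x, y⟩ := start
    obtain ⟨gx, gy⟩ := end_
    simp only
    -- A's sign and B's sign coincide
    have hdx : ((if gx > x then (1 : Int) else 0) - (if gx < x then 1 else 0))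
        = (if gx - x > 0 then (1 : Int) else if gx - x < 0 then -1 else 0) := by
      rcases lt_trichotomy x gx with h | h | h <;> split_ifs <;> omega
    have hdy : ((if gy > y then (1 : Int) else 0) - (if gy < y then 1 else 0))
        = (if gy - y > 0 then (1 : Int) else if gy - y < 0 then -1 else 0) := by
      rcases lt_trichotomy y gy with h | h | h <;> split_ifs <;> omega
    rw [hdx, hdy]
    set dx : Int := if gx - x > 0 then (1 : Int) else if gx - x < 0 then -1 else 0 with hdxdef
    set dy : Int := if gy - y > 0 then (1 : Int) else if gy - y < 0 then -1 else 0 with hdydef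
    have hax : x + dx * ((gx - x).natAbs : Int) = gx := by
      rw [hdxdef]; split_ifs <;> omega
    have hay : y + dy * ((gy - y).natAbs : Int) = gy := by
      rw [hdydef]; split_ifs <;> omega
    have hdx1 : (gx - x).natAbs ≠ 0 → dx = 1 ∨ dx = -1 := by
      intro h; rw [hdxdef]; split_ifs <;> omega
    have hdy1 : (gy - y).natAbs ≠ 0 → dy = 1 ∨ dy = -1 := by
      intro h; rw [hdydef]; split_ifs <;> omega
    by_cases hcond : (y = gap.2 ∧ dy < 0) ∨ (x = gap.1 ∧ dx < 0)
    · rw [if_pos hcond, if_pos hcond]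
      have := pvLoopV_spec (gy - y).natAbs (gx - x).natAbs x y dx dy [] hdx1 hdy1
      rw [hax, hay] at this
      rw [this, List.nil_append]
    · rw [if_neg hcond, if_neg hcond]
      have := pvLoopH_spec (gx - x).natAbs (gy - y).natAbs x y dx dy [] hdx1 hdy1
      rw [hax, hay] at this
      rw [this, List.nil_append]
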